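-- pv_equiv track=rewrite | github.com/codeWithMoez/Sequential-Pattern-Mining-with-Interactive-Visualization-Dashboard | backend/mining.py | _find_suffix
-- ===== SOURCE A (Python) =====
-- from typing import List, Dict, Any, Set, Tuple
--
-- def _find_suffix(sequence: List[str], pattern: List[str]) -> List[str]:
--     """
--     Find suffix of sequence after pattern occurrence.
--
--     Args:
--         sequence: Input sequence
--         pattern: Pattern to match
--
--     Returns:
--         Suffix after pattern, or None if pattern not found
--     """
--     pattern_len = len(pattern)
--     seq_len = len(sequence)
--
--     # Try to match pattern
--     for i in range(seq_len - pattern_len + 1):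
--         match = True
--         pattern_idx = 0
--
--         for j in range(i, seq_len):
--             if pattern_idx < pattern_len:
--                 if sequence[j] == pattern[pattern_idx]:
--                     pattern_idx += 1
--                 else:
--                     match = False
--                     break
--             else:
--                 break
--
--         if pattern_idx == pattern_len:
--             # Found match, return suffix
--             end_idx = i + pattern_len
--             if end_idx < seq_len:
--                 return sequence[end_idx:]
--             else:
--                 return []
--
--     return None
-- ===== SOURCE B (Python) =====
-- def _find_suffix(sequence, pattern):
--     """Single left-to-right pass simulating the prefix-matching NFA: maintain the
--     list of all live partial-match lengths instead of restarting a comparison at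
--     every start offset."""
--     m = len(pattern)
--     if m == 0:
--         return list(sequence)
--     live = [0]  # all l < m with pattern[:l] a suffix of the text scanned so far, descending
--     for i, x in enumerate(sequence):
--         nxt = [l + 1 for l in live if pattern[l] == x]
--         if m in nxt:
--             return sequence[i + 1:]
--         live = nxt + [0]
--     return None
-- ===== Notes on version B (the rewrite author's own statement) =====
-- stated objective: alternative
-- what changed: Replaces A's restart-at-every-offset nested scan by a single left-to-right pass that simulates the prefix-matching NFA, maintaining the list of all live partial-match lengths and reporting the first position where a full match ends.
import Mathlib
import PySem

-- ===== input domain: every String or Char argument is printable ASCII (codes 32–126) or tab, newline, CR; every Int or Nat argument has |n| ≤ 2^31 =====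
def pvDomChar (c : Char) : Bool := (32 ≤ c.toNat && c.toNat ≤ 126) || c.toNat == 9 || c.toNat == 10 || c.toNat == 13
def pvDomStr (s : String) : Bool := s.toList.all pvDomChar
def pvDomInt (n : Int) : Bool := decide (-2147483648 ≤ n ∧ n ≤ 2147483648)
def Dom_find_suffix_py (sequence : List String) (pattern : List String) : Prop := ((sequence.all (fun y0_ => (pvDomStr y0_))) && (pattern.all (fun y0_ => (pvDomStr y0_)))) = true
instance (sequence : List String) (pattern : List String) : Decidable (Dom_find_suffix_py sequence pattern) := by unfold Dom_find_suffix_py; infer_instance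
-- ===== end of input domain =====

-- B replaces A's restart-at-every-offset nested scan by one left-to-right pass that
-- simulates the prefix-matching NFA (set of live partial-match lengths); objective: alternative.

-- ===== PORT A =====
-- inner 'for j in range(i, seq_len)' loop; returns the final pattern_idx
-- (the 'match' flag set on the break is never read after the loop, so it carries no state)
def pvAInner (sequence pattern : List String) (m : Nat) : List Nat → Nat → Nat
  | [], pattern_idx => pattern_idx
  | j :: rest, pattern_idx =>
    if pattern_idx < m then
      -- indices j produced by range(i, seq_len) are always in range, so getD reads sequence[j]
      if sequence.getD j "" = pattern.getD pattern_idx "" then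
        pvAInner sequence pattern m rest (pattern_idx + 1)
      else pattern_idx        -- match = False; break
    else pattern_idx          -- break

-- outer 'for i in range(seq_len - pattern_len + 1)' loop
def pvAOuter (sequence pattern : List String) (m n : Nat) : List Nat → Option (List String)
  | [] => none                -- fell through: return None
  | i :: rest =>
    let pattern_idx := pvAInner sequence pattern m (List.range' i (n - i)) 0
    if pattern_idx = m then
      -- sequence[end_idx:] with 0 ≤ end_idx is List.drop (PySem.List.slice_from_natCast)
      if i + m < n then some (sequence.drop (i + m)) else some []
    else pvAOuter sequence pattern m n rest

def find_suffix_py (sequence : List String) (pattern : List String) : Option (List String) :=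
  -- range(seq_len - pattern_len + 1) is empty when pattern_len > seq_len, which is exactly
  -- what truncated Nat subtraction 'seq_len + 1 - pattern_len' gives
  pvAOuter sequence pattern pattern.length sequence.length
    (List.range (sequence.length + 1 - pattern.length))

-- ===== PORT B =====
-- 'for i, x in enumerate(sequence)' loop carrying the list 'live' of partial-match lengths
def pvBGo (sequence pattern : List String) (m : Nat) : List String → Nat → List Nat → Option (List String)
  | [], _, _ => none          -- fell through: return None
  | x :: rest, i, live =>
    -- nxt = [l + 1 for l in live if pattern[l] == x]  (all l in live are < m, so getD reads pattern[l])
    let nxt := (live.filter (fun l => pattern.getD l "" = x)).map (· + 1)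
    -- sequence[i + 1:] with a nonnegative index is List.drop (PySem.List.slice_from_natCast)
    if m ∈ nxt then some (sequence.drop (i + 1))
    else pvBGo sequence pattern m rest (i + 1) (nxt ++ [0])

def find_suffix_py_alt (sequence : List String) (pattern : List String) : Option (List String) :=
  if pattern.length = 0 then some sequence   -- 'return list(sequence)'
  else pvBGo sequence pattern pattern.length sequence 0 [0]

-- ===== PRECONDITION & SPEC =====
def Spec_find_suffix_py (sequence : List String) (pattern : List String) (out : Option (List String)) : Prop := out = find_suffix_py_alt sequence pattern
instance (sequence : List String) (pattern : List String) (out : Option (List String)) : Decidable (Spec_find_suffix_py sequence pattern out) := by unfold Spec_find_suffix_py; infer_instance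

-- ===== CLAIM (what is proved, stated in full; the proofs are below) =====
def Claim_equal_find_suffix_py : Prop := ∀ (sequence : List String) (pattern : List String), Dom_find_suffix_py sequence pattern → Spec_find_suffix_py sequence pattern (find_suffix_py sequence pattern)

-- ===== LEMMAS AND PROOFS =====

-- length of the common prefix of two lists, stopping at the first mismatch or at the end of either
def pvMatch : List String → List String → Nat
  | _, [] => 0
  | [], _ :: _ => 0
  | t :: ts, p :: ps => if t = p then pvMatch ts ps + 1 else 0

theorem pvMatch_nil (ps : List String) : pvMatch [] ps = 0 := by
  cases ps <;> rfl

theorem pvMatch_nil_right (ts : List String) : pvMatch ts [] = 0 := by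
  cases ts <;> rfl

-- A's inner loop computes pattern_idx plus the common-prefix length of the remaining text and pattern
theorem pvAInner_eq (sequence pattern : List String) (c j idx : Nat)
    (hjc : j + c = sequence.length) (hidx : idx ≤ pattern.length) :
    pvAInner sequence pattern pattern.length (List.range' j c) idx
      = idx + pvMatch (sequence.drop j) (pattern.drop idx) := by
  induction c generalizing j idx with
  | zero =>
    have : sequence.drop j = [] := by
      apply List.drop_of_length_le; omega
    simp [pvAInner, this, pvMatch_nil]
  | succ c ih =>
    have hj : j < sequence.length := by omega
    have hseq : sequence.drop j = sequence[j] :: sequence.drop (j + 1) :=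
      (List.getElem_cons_drop hj).symm
    rw [List.range'_succ]
    by_cases hlt : idx < pattern.length
    · have hpat : pattern.drop idx = pattern[idx] :: pattern.drop (idx + 1) :=
        (List.getElem_cons_drop hlt).symm
      have hg1 : sequence.getD j "" = sequence[j] := List.getD_eq_getElem _ _ hj
      have hg2 : pattern.getD idx "" = pattern[idx] := List.getD_eq_getElem _ _ hlt
      by_cases heq : sequence[j] = pattern[idx]
      · rw [pvAInner]
        simp only [hlt, if_pos, hg1, hg2, heq]
        rw [ih (j + 1) (idx + 1) (by omega) (by omega)]
        rw [hseq, hpat, pvMatch]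
        simp [heq]
        omega
      · rw [pvAInner]
        simp only [hlt, if_pos, hg1, hg2]
        rw [if_neg heq, hseq, hpat, pvMatch, if_neg heq]
        omega
    · have : pattern.drop idx = [] := by
        apply List.drop_of_length_le; omega
      rw [pvAInner]
      simp [Nat.not_lt.mpr (Nat.le_of_not_lt hlt), this, pvMatch_nil_right]

-- full match iff the pattern is a prefix
theorem pvMatch_eq_length_iff (ps ts : List String) :
    pvMatch ts ps = ps.length ↔ ps <+: ts := by
  induction ps generalizing ts with
  | nil => simp [pvMatch_nil_right]
  | cons p ps ih =>
    cases ts with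
    | nil => simp [pvMatch]
    | cons t ts =>
      rw [pvMatch]
      by_cases h : t = p
      · simp [h, ih, List.cons_prefix_cons]
      · simp [h]
        intro hc
        exact absurd hc.symm h

-- find? only looks at the predicate's value on members
theorem pvFind?_congr {α : Type} (l : List α) (p q : α → Bool)
    (h : ∀ a ∈ l, p a = q a) : l.find? p = l.find? q := by
  induction l with
  | nil => rfl
  | cons a rest ih =>
    rw [List.find?_cons, List.find?_cons, h a (List.mem_cons_self ..)]
    cases q a
    · exact ih fun b hb => h b (List.mem_cons_of_mem _ hb)
    · rfl

-- A's port equals: find the first start i with pattern a prefix of drop i, return drop (i+m)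
theorem pvAOuter_eq (sequence pattern : List String) (is : List Nat)
    (h : ∀ i ∈ is, i + pattern.length ≤ sequence.length) :
    pvAOuter sequence pattern pattern.length sequence.length is
      = (is.find? (fun i => decide (pattern <+: sequence.drop i))).map
          (fun i => sequence.drop (i + pattern.length)) := by
  induction is with
  | nil => rfl
  | cons i rest ih =>
    have him : i + pattern.length ≤ sequence.length := h i (List.mem_cons_self ..)
    have hinner : pvAInner sequence pattern pattern.length (List.range' i (sequence.length - i)) 0
        = pvMatch (sequence.drop i) pattern := by
      rw [pvAInner_eq sequence pattern (sequence.length - i) i 0 (by omega) (by omega)]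
      simp
    rw [pvAOuter, List.find?_cons]
    by_cases hp : pattern <+: sequence.drop i
    · have hm : pvAInner sequence pattern pattern.length (List.range' i (sequence.length - i)) 0
          = pattern.length := by rw [hinner]; exact (pvMatch_eq_length_iff ..).mpr hp
      rw [if_pos hm]
      simp only [hp, decide_true, Option.map_some]
      by_cases hend : i + pattern.length < sequence.length
      · simp [hend]
      · have : sequence.drop (i + pattern.length) = [] := by
          apply List.drop_of_length_le; omega
        simp [hend, this]
    · have hm : ¬ pvAInner sequence pattern pattern.length (List.range' i (sequence.length - i)) 0
          = pattern.length := by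
        rw [hinner]; exact fun hc => hp ((pvMatch_eq_length_iff ..).mp hc)
      rw [if_neg hm]
      simp only [hp, decide_false]
      exact ih fun x hx => h x (List.mem_cons_of_mem _ hx)

-- the set of live partial-match lengths after scanning t elements, in descending order
def pvLiveSpec (sequence pattern : List String) (t : Nat) : List Nat :=
  (List.range pattern.length).reverse.filter
    (fun l => decide (pattern.take l <:+ sequence.take t))

-- extending a partial match by one element
theorem pvStep_key (sequence pattern : List String) (l t : Nat)
    (hl : l < pattern.length) (ht : t < sequence.length) :
    (pattern.take (l + 1) <:+ sequence.take (t + 1))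
      ↔ ((pattern.take l <:+ sequence.take t) ∧ pattern.getD l "" = sequence.getD t "") := by
  have hp : pattern.take (l + 1) = pattern.take l ++ [pattern[l]] := by
    rw [List.take_add_one]
    simp [List.getElem?_eq_getElem hl]
  have hs : sequence.take (t + 1) = sequence.take t ++ [sequence[t]] := by
    rw [List.take_add_one]
    simp [List.getElem?_eq_getElem ht]
  have hg1 : pattern.getD l "" = pattern[l] := List.getD_eq_getElem _ _ hl
  have hg2 : sequence.getD t "" = sequence[t] := List.getD_eq_getElem _ _ ht
  rw [hp, hs, hg1, hg2, ← List.reverse_prefix]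
  simp only [List.reverse_append, List.reverse_singleton, List.singleton_append,
    List.cons_prefix_cons, List.reverse_prefix]
  tauto

-- at t = 0 only the empty prefix of the pattern is live
theorem pvLiveSpec_zero (sequence pattern : List String) (hm : 0 < pattern.length) :
    pvLiveSpec sequence pattern 0 = [0] := by
  unfold pvLiveSpec
  have hpred : ∀ l ∈ (List.range pattern.length).reverse,
      (decide (pattern.take l <:+ sequence.take 0)) = decide (l = 0) := by
    intro l hl
    have hlm : l < pattern.length := List.mem_range.mp (List.mem_reverse.mp hl)
    simp only [List.take_zero, List.suffix_nil, decide_eq_decide]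
    constructor
    · intro hc
      have h2 : min l pattern.length = 0 := by
        have := congrArg List.length hc
        simpa [List.length_take] using this
      omega
    · intro hc; simp [hc]
  rw [List.filter_congr hpred]
  obtain ⟨k, hk⟩ : ∃ k, pattern.length = k + 1 := ⟨pattern.length - 1, by omega⟩
  rw [hk]
  clear hpred hk hm
  induction k with
  | zero => decide
  | succ k ih =>
    rw [List.range_succ, List.reverse_append]
    simpa using ih

-- (range (k+1)).reverse = k :: (range k).reverse
theorem pvRange_reverse_cons (k : Nat) :
    (List.range (k + 1)).reverse = k :: (List.range k).reverse := by
  rw [List.range_succ, List.reverse_append]; rfl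

-- shifting: (range (k+1)).reverse = map (+1) ((range k).reverse) ++ [0]
theorem pvRange_reverse_shift (k : Nat) :
    (List.range (k + 1)).reverse = ((List.range k).reverse.map (· + 1)) ++ [0] := by
  induction k with
  | zero => decide
  | succ k ih =>
    rw [List.range_succ, List.reverse_append]
    conv_lhs => rw [ih]
    rw [List.range_succ, List.reverse_append, List.map_append]
    simp

-- one step of the NFA: nxt ++ [0] is the live set for t+1 (provided no full match ends at t+1),
-- and m ∈ nxt iff a full match ends at t+1
theorem pvNxt_mem (sequence pattern : List String) (t : Nat) (ht : t < sequence.length)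
    (hm : 0 < pattern.length) :
    (pattern.length ∈ ((pvLiveSpec sequence pattern t).filter
        (fun l => pattern.getD l "" = sequence.getD t "")).map (· + 1))
      ↔ pattern <:+ sequence.take (t + 1) := by
  simp only [List.mem_map, List.mem_filter, pvLiveSpec, List.mem_reverse, List.mem_range,
    decide_eq_true_eq]
  constructor
  · rintro ⟨l, ⟨⟨hlm, hsuf⟩, heq⟩, hl1⟩
    have hlval : l = pattern.length - 1 := by omega
    have hm : 0 < pattern.length := by omega
    have := (pvStep_key sequence pattern l t hlm ht).mpr ⟨hsuf, by simpa using heq⟩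
    have hfull : pattern.take (l + 1) = pattern := by
      rw [List.take_of_length_le]; omega
    rwa [hfull] at this
  · intro hsuf
    refine ⟨pattern.length - 1, ⟨⟨by omega, ?_⟩, ?_⟩, by omega⟩
    all_goals
      have hfull : pattern.take (pattern.length - 1 + 1) = pattern := by
        rw [List.take_of_length_le]; omega
      have := (pvStep_key sequence pattern (pattern.length - 1) t (by omega) ht).mp
        (by rwa [hfull])
    · exact this.1
    · simpa using this.2

theorem pvLiveSpec_step (sequence pattern : List String) (t : Nat) (ht : t < sequence.length)
    (hm : 0 < pattern.length) (hno : ¬ pattern <:+ sequence.take (t + 1)) :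
    ((pvLiveSpec sequence pattern t).filter
        (fun l => pattern.getD l "" = sequence.getD t "")).map (· + 1) ++ [0]
      = pvLiveSpec sequence pattern (t + 1) := by
  obtain ⟨k, hk⟩ : ∃ k, pattern.length = k + 1 := ⟨pattern.length - 1, by omega⟩
  unfold pvLiveSpec
  rw [hk]
  conv_lhs => rw [pvRange_reverse_cons]
  conv_rhs => rw [pvRange_reverse_shift]
  rw [List.filter_filter, List.filter_cons, List.filter_append, List.filter_map]
  have hhead : ((decide (pattern.getD k "" = sequence.getD t ""))
      && decide (pattern.take k <:+ sequence.take t)) = false := by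
    by_contra hc
    have hb := Bool.of_not_eq_false hc
    simp only [Bool.and_eq_true, decide_eq_true_eq] at hb
    have hkm : k < pattern.length := by omega
    have := (pvStep_key sequence pattern k t hkm ht).mpr ⟨hb.2, hb.1⟩
    rw [List.take_of_length_le (by omega)] at this
    exact hno this
  rw [hhead]
  have h0 : List.filter (fun l => decide (pattern.take l <:+ sequence.take (t + 1))) [0]
      = [0] := by simp
  rw [h0]
  simp only [Bool.false_eq_true, if_false]
  congr 1
  congr 1
  apply List.filter_congr
  intro l hl
  have hlk : l < k := List.mem_range.mp (List.mem_reverse.mp hl)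
  have hlm : l < pattern.length := by omega
  rw [Bool.eq_iff_iff]
  simp only [Function.comp_apply, Bool.and_eq_true, decide_eq_true_eq]
  rw [pvStep_key sequence pattern l t hlm ht]
  tauto

-- B's loop invariant: starting at position t with the correct live set, pvBGo returns the
-- first end position e in (t, n] with pattern a suffix of take e, as drop e
theorem pvBGo_eq (sequence pattern : List String) (hm : 0 < pattern.length) :
    ∀ c t, t + c = sequence.length →
    pvBGo sequence pattern pattern.length (sequence.drop t) t (pvLiveSpec sequence pattern t)
      = ((List.range' (t + 1) c).find? (fun e => decide (pattern <:+ sequence.take e))).map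
          (fun e => sequence.drop e) := by
  intro c
  induction c with
  | zero =>
    intro t htc
    have : sequence.drop t = [] := by apply List.drop_of_length_le; omega
    rw [this]
    rfl
  | succ c ih =>
    intro t htc
    have ht : t < sequence.length := by omega
    have hseq : sequence.drop t = sequence[t] :: sequence.drop (t + 1) :=
      (List.getElem_cons_drop ht).symm
    rw [hseq, pvBGo, List.range'_succ, List.find?_cons]
    have hgt : sequence.getD t "" = sequence[t] := List.getD_eq_getElem _ _ ht
    by_cases hfull : pattern <:+ sequence.take (t + 1)
    · have : pattern.length ∈ ((pvLiveSpec sequence pattern t).filter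
          (fun l => pattern.getD l "" = sequence[t])).map (· + 1) := by
        rw [← hgt]; exact (pvNxt_mem sequence pattern t ht hm).mpr hfull
      rw [if_pos this]
      simp [hfull]
    · have : pattern.length ∉ ((pvLiveSpec sequence pattern t).filter
          (fun l => pattern.getD l "" = sequence[t])).map (· + 1) := by
        rw [← hgt]; exact fun hc => hfull ((pvNxt_mem sequence pattern t ht hm).mp hc)
      rw [if_neg this]
      have hstep : ((pvLiveSpec sequence pattern t).filter
            (fun l => pattern.getD l "" = sequence[t])).map (· + 1) ++ [0]
          = pvLiveSpec sequence pattern (t + 1) := by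
        rw [← hgt]; exact pvLiveSpec_step sequence pattern t ht hm hfull
      rw [hstep]
      simp only [hfull, decide_false]
      exact ih (t + 1) (by omega)

-- suffix-of-prefix ↔ prefix-of-suffix, for m ≤ e ≤ n
theorem pvBridge_key (sequence pattern : List String) (e : Nat)
    (hme : pattern.length ≤ e) (hen : e ≤ sequence.length) :
    (pattern <:+ sequence.take e) ↔ (pattern <+: sequence.drop (e - pattern.length)) := by
  have hlen : (sequence.take e).length = e := by
    rw [List.length_take]; omega
  rw [List.suffix_iff_eq_drop, List.prefix_iff_eq_take, hlen, List.drop_take]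
  rw [show e - (e - pattern.length) = pattern.length by omega]

-- pattern cannot be a suffix of a too-short prefix
theorem pvShort (sequence pattern : List String) (e : Nat) (he : e < pattern.length) :
    ¬ pattern <:+ sequence.take e := by
  intro hc
  have := hc.length_le
  rw [List.length_take] at this
  omega

-- the bridge: first end position vs first start position
theorem pvBridge (sequence pattern : List String) (hm : 0 < pattern.length) :
    ((List.range (sequence.length + 1 - pattern.length)).find?
        (fun i => decide (pattern <+: sequence.drop i))).map
        (fun i => sequence.drop (i + pattern.length))
      = ((List.range' 1 sequence.length).find?
          (fun e => decide (pattern <:+ sequence.take e))).map (fun e => sequence.drop e) := by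
  set m := pattern.length with hmdef
  set n := sequence.length with hndef
  by_cases hmn : m ≤ n
  · have hsplit : List.range' 1 n = List.range' 1 (m - 1) ++ List.range' m (n - m + 1) := by
      have h := @List.range'_append 1 (m - 1) (n - m + 1) 1
      rw [show 1 + 1 * (m - 1) = m by omega, show m - 1 + (n - m + 1) = n by omega] at h
      exact h.symm
    rw [hsplit, List.find?_append]
    have hnone : (List.range' 1 (m - 1)).find?
        (fun e => decide (pattern <:+ sequence.take e)) = none := by
      rw [List.find?_eq_none]
      intro e he
      have := List.mem_range'_1.mp he
      simp only [decide_eq_true_eq]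
      exact pvShort sequence pattern e (by omega)
    rw [hnone, Option.none_or]
    rw [show List.range' m (n - m + 1) = (List.range (n - m + 1)).map (m + ·) from
      List.range'_eq_map_range .., List.find?_map, Option.map_map]
    rw [show n + 1 - m = n - m + 1 by omega]
    rw [pvFind?_congr (List.range (n - m + 1))
      (fun i => decide (pattern <+: sequence.drop i))
      (fun i => decide (pattern <:+ sequence.take (m + i)))]
    · congr 1
      funext i
      simp only [Function.comp_apply]
      congr 1
      omega
    · intro i hi
      have hii := List.mem_range.mp hi
      simp only [decide_eq_decide]
      rw [pvBridge_key sequence pattern (m + i) (by omega) (by omega)]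
      rw [show m + i - m = i by omega]
  · have h1 : List.range (n + 1 - m) = [] := by
      rw [show n + 1 - m = 0 by omega]; rfl
    have h2 : (List.range' 1 n).find? (fun e => decide (pattern <:+ sequence.take e)) = none := by
      rw [List.find?_eq_none]
      intro e he
      have := List.mem_range'_1.mp he
      simp only [decide_eq_true_eq]
      exact pvShort sequence pattern e (by omega)
    rw [h1, h2]
    rfl

-- ===== VERDICT (by name: the statement is the Claim_ definition above) =====
theorem find_suffix_py_spec : Claim_equal_find_suffix_py := by
  intro sequence pattern _
  unfold Spec_find_suffix_py find_suffix_py find_suffix_py_alt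
  rw [pvAOuter_eq]
  · by_cases hm : pattern.length = 0
    · -- empty pattern: A finds i = 0 at once; B returns the whole sequence
      have hpat : pattern = [] := List.length_eq_zero_iff.mp hm
      subst hpat
      simp only [List.length_nil, Nat.sub_zero, if_pos]
      rw [List.range_succ_eq_map, List.find?_cons]
      simp
    · rw [if_neg hm]
      have h0 : pvLiveSpec sequence pattern 0 = [0] :=
        pvLiveSpec_zero sequence pattern (by omega)
      have := pvBGo_eq sequence pattern (by omega) sequence.length 0 (by omega)
      rw [List.drop_zero, h0] at this
      rw [this]
      exact pvBridge sequence pattern (by omega)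
  · intro i hi
    have := List.mem_range.mp hi
    omega
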